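-- pv_equiv track=rewrite | github.com/TrishaDatta/cs221project | get_domain_features.py | get_domain_keyword_features
-- ===== SOURCE A (Python) =====
-- def get_domain_keyword_features(domains):
--     news_words = ['times','herald','tribune','chronicle','post','today',
--                   'press','observer','sun','paper','media','stand','journal',
--                   'independent','globe','mail','inquirer','courant', 'telegraph',
--                   'dispatch', 'express', 'daily','dispatch','sentinel','gazette',
--                   'standard','telegram']
--     contain_news_words = []
--     for domain in domains:
--         for word in news_words:
--             contains_news_word = False
--             if word in domain:
--                 contains_news_word = True
--                 break
--         if contains_news_word:
--             contain_news_words.append(1)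
--         else:
--             contain_news_words.append(0)
--     return contain_news_words
-- ===== SOURCE B (Python) =====
-- import re
--
-- _NEWS_RE = re.compile('times|herald|tribune|chronicle|post|today|'
--                       'press|observer|sun|paper|media|stand|journal|'
--                       'independent|globe|mail|inquirer|courant|telegraph|'
--                       'dispatch|express|daily|dispatch|sentinel|gazette|'
--                       'standard|telegram')
--
-- def get_domain_keyword_features(domains):
--     return [1 if _NEWS_RE.search(domain) else 0 for domain in domains]
-- ===== Notes on version B (the rewrite author's own statement) =====
-- stated objective: idiomatic
-- what changed: Replaces the explicit per-keyword inner loop (flag variable + break) by one compiled regex alternation pattern of all news keywords; each domain is scanned once by the regex automaton and a list comprehension builds the 0/1 list.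
import Mathlib
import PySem

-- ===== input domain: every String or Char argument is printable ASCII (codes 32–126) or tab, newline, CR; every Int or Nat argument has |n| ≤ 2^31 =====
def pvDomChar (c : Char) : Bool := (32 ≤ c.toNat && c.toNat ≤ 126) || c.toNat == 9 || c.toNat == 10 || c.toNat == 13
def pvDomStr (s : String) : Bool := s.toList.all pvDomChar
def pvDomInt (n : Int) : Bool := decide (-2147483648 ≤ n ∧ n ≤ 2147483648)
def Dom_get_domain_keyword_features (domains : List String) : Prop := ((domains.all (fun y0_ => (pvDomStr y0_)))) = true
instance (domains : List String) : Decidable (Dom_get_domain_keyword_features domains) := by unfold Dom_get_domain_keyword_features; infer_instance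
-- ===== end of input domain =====

-- B replaces A's explicit per-keyword inner loop (flag + break) by one compiled regex alternation pattern, scanned left-to-right over each domain; return values proved equal on all inputs.


-- ===== PORT A =====
-- the literal news_words list of A
def newsWordsA : List String :=
  ["times","herald","tribune","chronicle","post","today",
   "press","observer","sun","paper","media","stand","journal",
   "independent","globe","mail","inquirer","courant","telegraph",
   "dispatch","express","daily","dispatch","sentinel","gazette",
   "standard","telegram"]

-- A's inner 'for word in news_words' loop carrying the flag variable; 'break' = return true
def innerLoopA (domain : String) : List String → Bool → Bool
  | [], c => c
  | w :: ws, _c =>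
    -- contains_news_word = False; if word in domain: True; break
    if PySem.Str.isIn w domain then true else innerLoopA domain ws false

def get_domain_keyword_features (domains : List String) : List Int :=
  domains.foldl (fun acc domain =>
    if innerLoopA domain newsWordsA false then acc ++ [1] else acc ++ [0]) []

-- ===== PORT B =====
-- Source B's compiled pattern literal (re.compile of a plain alternation)
def newsPattern : String :=
  "times|herald|tribune|chronicle|post|today|press|observer|sun|paper|media|stand|journal|independent|globe|mail|inquirer|courant|telegraph|dispatch|express|daily|dispatch|sentinel|gazette|standard|telegram"

-- the compiled automaton's alternatives: the pattern split at '|'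
def newsAlts : List (List Char) :=
  PySem.Chars.splitOn newsPattern.toList "|".toList

-- re.search on a plain alternation: try each position left to right; at a position the
-- pattern matches iff some alternative is a prefix of the remaining suffix
def reSearchAlts (alts : List (List Char)) : List Char → Bool
  | [] => alts.any (fun w => w.isPrefixOf ([] : List Char))
  | c :: rest =>
    if alts.any (fun w => w.isPrefixOf (c :: rest)) then true else reSearchAlts alts rest

def get_domain_keyword_features_alt (domains : List String) : List Int :=
  domains.map (fun domain => if reSearchAlts newsAlts domain.toList then 1 else 0)

-- ===== PRECONDITION & SPEC =====
def Spec_get_domain_keyword_features (domains : List String) (out : List Int) : Prop := out = get_domain_keyword_features_alt domains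
instance (domains : List String) (out : List Int) : Decidable (Spec_get_domain_keyword_features domains out) := by unfold Spec_get_domain_keyword_features; infer_instance

-- ===== CLAIM (what is proved, stated in full; the proofs are below) =====
def Claim_equal_get_domain_keyword_features : Prop := ∀ (domains : List String), Dom_get_domain_keyword_features domains → Spec_get_domain_keyword_features domains (get_domain_keyword_features domains)

-- ===== LEMMAS AND PROOFS =====

-- splitting Source B's pattern at '|' yields exactly A's word list
set_option maxRecDepth 4096 in
theorem newsAlts_eq : newsAlts = newsWordsA.map String.toList := by decide

-- A's inner loop on a nonempty word list is just 'any word is a substring'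
theorem innerLoopA_eq_any (domain : String) (ws : List String) (c : Bool) (h : ws ≠ []) :
    innerLoopA domain ws c = ws.any (fun w => PySem.Str.isIn w domain) := by
  induction ws generalizing c with
  | nil => exact absurd rfl h
  | cons w ws ih =>
    show (if PySem.Str.isIn w domain then true else innerLoopA domain ws false) = _
    rw [List.any_cons]
    by_cases hw : PySem.Str.isIn w domain = true
    · rw [if_pos hw, hw, Bool.true_or]
    · rw [if_neg hw, Bool.eq_false_iff.mpr hw, Bool.false_or]
      cases ws with
      | nil => rfl
      | cons w' ws' => exact ih false (by simp)

-- the regex scan finds a match iff some alternative occurs as a prefix of some suffix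
theorem reSearchAlts_true_iff (alts : List (List Char)) (s : List Char) :
    reSearchAlts alts s = true ↔ ∃ w ∈ alts, ∃ j, w <+: s.drop j := by
  induction s with
  | nil =>
    simp only [reSearchAlts, List.any_eq_true]
    constructor
    · rintro ⟨w, hw, hp⟩
      exact ⟨w, hw, 0, by simpa using List.isPrefixOf_iff_prefix.mp hp⟩
    · rintro ⟨w, hw, j, hp⟩
      exact ⟨w, hw, List.isPrefixOf_iff_prefix.mpr (by simpa using hp)⟩
  | cons c rest ih =>
    simp only [reSearchAlts]
    by_cases h : (alts.any (fun w => w.isPrefixOf (c :: rest))) = true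
    · rw [if_pos h]
      simp only [true_iff]
      obtain ⟨w, hw, hp⟩ := List.any_eq_true.mp h
      exact ⟨w, hw, 0, by simpa using List.isPrefixOf_iff_prefix.mp hp⟩
    · rw [if_neg h]
      rw [ih]
      constructor
      · rintro ⟨w, hw, j, hp⟩
        exact ⟨w, hw, j + 1, by simpa using hp⟩
      · rintro ⟨w, hw, j, hp⟩
        cases j with
        | zero =>
          exfalso
          exact h (List.any_eq_true.mpr ⟨w, hw, List.isPrefixOf_iff_prefix.mpr (by simpa using hp)⟩)
        | succ j => exact ⟨w, hw, j, by simpa using hp⟩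

-- per-domain agreement of the two match tests
theorem match_agree (domain : String) :
    innerLoopA domain newsWordsA false = reSearchAlts newsAlts domain.toList := by
  rw [innerLoopA_eq_any domain newsWordsA false (by simp [newsWordsA])]
  rw [Bool.eq_iff_iff, List.any_eq_true, reSearchAlts_true_iff, newsAlts_eq]
  constructor
  · rintro ⟨w, hw, hin⟩
    refine ⟨w.toList, List.mem_map_of_mem hw, ?_⟩
    have := (PySem.Str.isIn_iff_infix w domain).mp hin
    obtain ⟨j, hj⟩ := (PySem.Chars.exists_prefix_drop_iff_isIn w.toList domain.toList).mpr
      ((PySem.Chars.isIn_iff_infix _ _).mpr this)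
    exact ⟨j, hj⟩
  · rintro ⟨wl, hwl, j, hp⟩
    obtain ⟨w, hw, rfl⟩ := List.mem_map.mp hwl
    refine ⟨w, hw, ?_⟩
    exact (PySem.Str.isIn_iff_infix w domain).mpr
      ((PySem.Chars.isIn_iff_infix _ _).mp
        ((PySem.Chars.exists_prefix_drop_iff_isIn _ _).mp ⟨j, hp⟩))

-- the outer foldl-append loop, rewritten per element via match_agree
theorem foldA_eq (domains : List String) (acc : List Int) :
    domains.foldl (fun acc domain =>
      if innerLoopA domain newsWordsA false then acc ++ [1] else acc ++ [0]) acc =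
    acc ++ domains.map (fun domain => if reSearchAlts newsAlts domain.toList then 1 else 0) := by
  induction domains generalizing acc with
  | nil => simp
  | cons d ds ih =>
    by_cases h : reSearchAlts newsAlts d.toList <;>
      simp [List.foldl_cons, match_agree d, h, ih]

-- ===== VERDICT (by name: the statement is the Claim_ definition above) =====
theorem get_domain_keyword_features_spec : Claim_equal_get_domain_keyword_features := by
  intro domains _
  unfold Spec_get_domain_keyword_features get_domain_keyword_features get_domain_keyword_features_alt
  simpa using foldA_eq domains []
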